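-- pv_equiv track=rewrite | github.com/Omarange/farmerapp | rag_ingest.py | detect_tags
-- ===== SOURCE A (Python) =====
-- from typing import Dict, List, Optional, Set, Tuple
--
-- def detect_tags(text: str, keyword_map: Dict[str, List[str]]) -> Set[str]:
--     tags: Set[str] = set()
--     if not text:
--         return tags
--     for tag, tokens in keyword_map.items():
--         for token in tokens:
--             if token and token in text:
--                 tags.add(tag)
--                 break
--     return tags
-- ===== SOURCE B (Python) =====
-- def detect_tags(text, keyword_map):
--     # Invert the problem: build the distinct non-empty token set once, determine
--     # in one pass which of those tokens occur in the text, then select the tags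
--     # whose token list intersects the found set (no per-tag substring scans,
--     # no retesting of duplicate tokens, no break logic).
--     tokens = set()
--     for toks in keyword_map.values():
--         for t in toks:
--             if t:
--                 tokens.add(t)
--     found = {t for t in tokens if text.find(t) != -1}
--     return {tag for tag, toks in keyword_map.items() if any(t in found for t in toks)}
-- ===== Notes on version B (the rewrite author's own statement) =====
-- stated objective: alternative
-- what changed: A scans tag-by-tag, testing every token (duplicates included) for substring membership with a break on first hit; B builds the distinct non-empty token set once, computes the set of tokens occurring in the text in a single pass over that set, and then selects tags by intersecting each token list with the found set.
import Mathlib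
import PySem

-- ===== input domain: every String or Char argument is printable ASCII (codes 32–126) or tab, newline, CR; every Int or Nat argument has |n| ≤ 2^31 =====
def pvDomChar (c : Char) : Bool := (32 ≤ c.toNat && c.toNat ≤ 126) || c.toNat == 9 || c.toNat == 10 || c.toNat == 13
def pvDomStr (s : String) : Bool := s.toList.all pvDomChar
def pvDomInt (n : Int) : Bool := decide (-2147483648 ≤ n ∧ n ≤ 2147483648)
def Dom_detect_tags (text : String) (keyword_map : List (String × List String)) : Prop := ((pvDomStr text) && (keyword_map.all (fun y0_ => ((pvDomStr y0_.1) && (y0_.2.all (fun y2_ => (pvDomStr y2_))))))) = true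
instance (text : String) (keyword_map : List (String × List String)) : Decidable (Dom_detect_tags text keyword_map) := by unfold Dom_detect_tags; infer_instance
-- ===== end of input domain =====

-- B inverts A's traversal (one position scan over the text against the distinct non-empty
-- tokens, then a token->tag pass) instead of A's per-tag substring tests; same result.

-- ===== PORT A =====
-- 'for token in tokens: if token and token in text: tags.add(tag); break'
def pvLoopA (text : String) (tag : String) (tags : PySem.Set String) : List String → PySem.Set String
  | [] => tags
  | t :: rest =>
      if t ≠ "" ∧ PySem.Str.isIn t text then PySem.Set.add tags tag
      else pvLoopA text tag tags rest

def detect_tags (text : String) (keyword_map : List (String × List String)) : List String :=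
  let tags : PySem.Set String := PySem.Set.empty
  if text = "" then tags
  else keyword_map.foldl (fun tags p => pvLoopA text p.1 tags p.2) tags

-- ===== PORT B =====
-- distinct non-empty tokens of the map ('if t: tokens.add(t)')
def pvTokens (keyword_map : List (String × List String)) : PySem.Set String :=
  keyword_map.foldl
    (fun s p => p.2.foldl (fun s t => if t = "" then s else PySem.Set.add s t) s)
    PySem.Set.empty

-- 'found = {t for t in tokens if text.find(t) != -1}'
def pvFound (text : String) (tokens : PySem.Set String) : PySem.Set String :=
  tokens.foldl
    (fun f t => if PySem.Str.find text t ≠ -1 then PySem.Set.add f t else f)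
    PySem.Set.empty

def detect_tags_alt (text : String) (keyword_map : List (String × List String)) : List String :=
  let tokens := pvTokens keyword_map
  let found := pvFound text tokens
  keyword_map.foldl
    (fun tags p => if p.2.any (fun t => PySem.Set.contains found t) then PySem.Set.add tags p.1 else tags)
    PySem.Set.empty

-- ===== PRECONDITION & SPEC =====
def Spec_detect_tags (text : String) (keyword_map : List (String × List String)) (out : List String) : Prop := out = detect_tags_alt text keyword_map
instance (text : String) (keyword_map : List (String × List String)) (out : List String) : Decidable (Spec_detect_tags text keyword_map out) := by unfold Spec_detect_tags; infer_instance

-- ===== CLAIM (what is proved, stated in full; the proofs are below) =====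
def Claim_equal_detect_tags : Prop := ∀ (text : String) (keyword_map : List (String × List String)), Dom_detect_tags text keyword_map → Spec_detect_tags text keyword_map (detect_tags text keyword_map)

-- ===== LEMMAS AND PROOFS =====

-- membership in a conditional-add fold
theorem pv_mem_foldl_addIf (p : String → Prop) [DecidablePred p] (x : String) :
    ∀ (l : List String) (s : PySem.Set String),
      x ∈ l.foldl (fun s t => if p t then PySem.Set.add s t else s) s ↔ x ∈ s ∨ (x ∈ l ∧ p x) := by
  intro l
  induction l with
  | nil => intro s; simp
  | cons t rest ih =>
      intro s
      simp only [List.foldl_cons]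
      by_cases hp : p t
      · rw [if_pos hp, ih]
        simp only [PySem.Set.mem_add, List.mem_cons]
        constructor
        · rintro ((h | rfl) | h)
          · exact Or.inl h
          · exact Or.inr ⟨Or.inl rfl, hp⟩
          · exact Or.inr ⟨Or.inr h.1, h.2⟩
        · rintro (h | ⟨(rfl | h), hx⟩)
          · exact Or.inl (Or.inl h)
          · exact Or.inl (Or.inr rfl)
          · exact Or.inr ⟨h, hx⟩
      · rw [if_neg hp, ih]
        simp only [List.mem_cons]
        constructor
        · rintro (h | h)
          · exact Or.inl h
          · exact Or.inr ⟨Or.inr h.1, h.2⟩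
        · rintro (h | ⟨(rfl | h), hx⟩)
          · exact Or.inl h
          · exact (hp hx).elim
          · exact Or.inr ⟨h, hx⟩

theorem pv_tokens_inner_shape :
    (fun (s : PySem.Set String) t => if t = "" then s else PySem.Set.add s t)
      = (fun (s : PySem.Set String) t => if t ≠ "" then PySem.Set.add s t else s) := by
  funext s t
  by_cases h : t = "" <;> simp [h]

theorem pv_mem_tokens_aux (x : String) :
    ∀ (km : List (String × List String)) (s0 : PySem.Set String),
      x ∈ km.foldl (fun s p => p.2.foldl (fun s t => if t = "" then s else PySem.Set.add s t) s) s0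
        ↔ x ∈ s0 ∨ (x ≠ "" ∧ ∃ p ∈ km, x ∈ p.2) := by
  intro km
  induction km with
  | nil => intro s0; simp
  | cons p rest ih =>
      intro s0
      simp only [List.foldl_cons]
      rw [ih, pv_tokens_inner_shape, pv_mem_foldl_addIf (fun t => t ≠ "") x p.2 s0]
      simp only [List.mem_cons]
      constructor
      · rintro ((h | ⟨hx, hne⟩) | ⟨hne, q, hq, hxq⟩)
        · exact Or.inl h
        · exact Or.inr ⟨hne, p, Or.inl rfl, hx⟩
        · exact Or.inr ⟨hne, q, Or.inr hq, hxq⟩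
      · rintro (h | ⟨hne, q, (rfl | hq), hxq⟩)
        · exact Or.inl (Or.inl h)
        · exact Or.inl (Or.inr ⟨hxq, hne⟩)
        · exact Or.inr ⟨hne, q, hq, hxq⟩

theorem pv_mem_tokens (keyword_map : List (String × List String)) (x : String) :
    x ∈ pvTokens keyword_map ↔ x ≠ "" ∧ ∃ p ∈ keyword_map, x ∈ p.2 := by
  unfold pvTokens
  rw [pv_mem_tokens_aux]
  simp [PySem.Set.empty]

theorem pv_mem_found (text : String) (tokens : PySem.Set String) (x : String) :
    x ∈ pvFound text tokens ↔ x ∈ tokens ∧ PySem.Str.isIn x text = true := by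
  unfold pvFound
  rw [pv_mem_foldl_addIf (fun t => PySem.Str.find text t ≠ -1) x tokens PySem.Set.empty]
  simp only [PySem.Set.empty, List.not_mem_nil, false_or]
  constructor
  · rintro ⟨ht, hf⟩
    exact ⟨ht, by
      rw [PySem.Str.isIn_iff_infix]
      exact (PySem.Str.find_ne_neg_one_iff _ _).mp hf⟩
  · rintro ⟨ht, hin⟩
    exact ⟨ht, (PySem.Str.find_ne_neg_one_iff _ _).mpr ((PySem.Str.isIn_iff_infix _ _).mp hin)⟩

-- A's inner loop adds the tag iff some non-empty token occurs in the text
theorem pv_loopA_eq (text tag : String) (tags : PySem.Set String) :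
    ∀ toks : List String,
      pvLoopA text tag tags toks
        = if ∃ t ∈ toks, t ≠ "" ∧ PySem.Str.isIn t text = true then PySem.Set.add tags tag else tags := by
  intro toks
  induction toks generalizing tags with
  | nil => simp [pvLoopA]
  | cons t rest ih =>
      by_cases h : t ≠ "" ∧ PySem.Str.isIn t text
      · rw [pvLoopA, if_pos h, if_pos ⟨t, List.mem_cons_self, h.1, h.2⟩]
      · rw [pvLoopA, if_neg h, ih]
        congr 1
        simp only [List.mem_cons, eq_iff_iff]
        constructor
        · rintro ⟨u, hu, hc⟩
          exact ⟨u, Or.inr hu, hc⟩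
        · rintro ⟨u, (rfl | hu), hc⟩
          · exact absurd hc h
          · exact ⟨u, hu, hc⟩

-- the per-entry conditions agree, entrywise inside keyword_map
theorem pv_cond_eq (text : String) (keyword_map : List (String × List String))
    (p : String × List String) (hp : p ∈ keyword_map) :
    (p.2.any (fun t => PySem.Set.contains (pvFound text (pvTokens keyword_map)) t) = true)
      ↔ ∃ t ∈ p.2, t ≠ "" ∧ PySem.Str.isIn t text = true := by
  rw [List.any_eq_true]
  constructor
  · rintro ⟨t, ht, hc⟩
    rw [PySem.Set.contains_iff, pv_mem_found] at hc
    obtain ⟨htok, hscan⟩ := hc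
    have hne : t ≠ "" := ((pv_mem_tokens keyword_map t).mp htok).1
    exact ⟨t, ht, hne, hscan⟩
  · rintro ⟨t, ht, hne, hin⟩
    refine ⟨t, ht, ?_⟩
    rw [PySem.Set.contains_iff, pv_mem_found]
    exact ⟨(pv_mem_tokens keyword_map t).mpr ⟨hne, p, hp, ht⟩, hin⟩

-- B's fold equals A's fold (any text)
theorem pv_folds_eq (text : String) (keyword_map : List (String × List String)) :
    keyword_map.foldl
        (fun tags p => if p.2.any (fun t => PySem.Set.contains (pvFound text (pvTokens keyword_map)) t)
            then PySem.Set.add tags p.1 else tags)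
        PySem.Set.empty
      = keyword_map.foldl (fun tags p => pvLoopA text p.1 tags p.2) PySem.Set.empty := by
  apply PySem.List.foldl_congr_mem
  intro tags p hp
  rw [pv_loopA_eq]
  by_cases h : ∃ t ∈ p.2, t ≠ "" ∧ PySem.Str.isIn t text = true
  · rw [if_pos ((pv_cond_eq text keyword_map p hp).mpr h), if_pos h]
  · rw [if_neg (fun hb => h ((pv_cond_eq text keyword_map p hp).mp hb)), if_neg h]

-- when no token matches (e.g. empty text), A's fold never adds
theorem pv_foldA_empty (text : String)
    (hnone : ∀ t : String, t ≠ "" → PySem.Str.isIn t text = false) :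
    ∀ (km : List (String × List String)) (s : PySem.Set String),
      km.foldl (fun tags p => pvLoopA text p.1 tags p.2) s = s := by
  intro km
  induction km with
  | nil => intro s; simp
  | cons p rest ih =>
      intro s
      simp only [List.foldl_cons]
      rw [pv_loopA_eq, if_neg, ih]
      rintro ⟨t, _, hne, hin⟩
      rw [hnone t hne] at hin
      exact Bool.false_ne_true hin

-- ===== VERDICT (by name: the statement is the Claim_ definition above) =====
theorem detect_tags_spec : Claim_equal_detect_tags := by
  intro text keyword_map _
  unfold Spec_detect_tags detect_tags detect_tags_alt
  simp only []
  rw [pv_folds_eq]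
  by_cases h : text = ""
  · rw [if_pos h]
    rw [pv_foldA_empty]
    intro t hne
    subst h
    rw [← Bool.not_eq_true, PySem.Str.isIn_iff_infix]
    intro hinf
    have : t.toList = [] := List.infix_nil.mp (by simpa using hinf)
    exact hne (by ext : 1; exact this)
  · rw [if_neg h]
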